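-- pv_equiv track=rewrite | github.com/synodriver/Cohesive_insert | 2D_Global_cohesive_insert/2d_global_insert.py | extract_element
-- ===== SOURCE A (Python) =====
-- def extract_element(text):
--     eigenvalue = False
--     element_dict = {}
--     for i in text:
--         if i.startswith('*Element'):
--             eigenvalue = True
--         elif i.startswith('*Nset') or i.startswith('*End'):
--             return element_dict
--         else: pass
--         if eigenvalue:
--             if i.startswith('*Element'): pass
--             else:
--                 T = i.replace(' ', '').replace('\n', '').split(',')
--                 element_dict[T[0]] = T[1:]
--         else: pass
-- ===== SOURCE B (Python) =====
-- def extract_element(text):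
--     it = iter(text)
--     # Phase 1: scan until the '*Element' header.
--     for line in it:
--         if line.startswith('*Nset') or line.startswith('*End'):
--             return {}
--         if line.startswith('*Element'):
--             break
--     else:
--         return None
--     # Phase 2: collect data lines until a section terminator.
--     element_dict = {}
--     for line in it:
--         if line.startswith('*Nset') or line.startswith('*End'):
--             return element_dict
--         if not line.startswith('*Element'):
--             T = line.replace(' ', '').replace('\n', '').split(',')
--             element_dict[T[0]] = T[1:]
--     return None
-- ===== Notes on version B (the rewrite author's own statement) =====
-- stated objective: simpler
-- what changed: Replaces A's single loop with a boolean 'eigenvalue' flag tested on every line by two sequential phases over one shared iterator: phase one finds the '*Element' header (or returns {} at a terminator), phase two collects data lines until a terminator, so the flag disappears.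
-- outside the precondition, e.g. on extract_element(['*Element', '1, 2']): A returns None, B returns None
import Mathlib
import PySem

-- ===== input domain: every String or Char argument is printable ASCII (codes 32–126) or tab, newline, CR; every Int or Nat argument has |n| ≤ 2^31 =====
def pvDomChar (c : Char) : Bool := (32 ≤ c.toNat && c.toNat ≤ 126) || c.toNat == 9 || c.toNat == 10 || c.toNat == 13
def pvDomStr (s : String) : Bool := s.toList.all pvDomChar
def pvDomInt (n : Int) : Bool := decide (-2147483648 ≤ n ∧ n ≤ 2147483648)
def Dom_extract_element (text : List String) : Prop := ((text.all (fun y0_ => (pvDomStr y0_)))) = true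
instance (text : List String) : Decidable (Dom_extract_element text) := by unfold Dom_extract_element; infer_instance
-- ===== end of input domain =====

-- B replaces A's flag-toggled single loop by two sequential phases (find the '*Element'
-- header, then collect data lines), which is plainer; equivalence is about the RETURN value
-- on inputs where A returns a dict (Pre_ excludes the fall-off-the-end None return).

-- shared primitive: '*Nset'/'*End' section terminator test
def isTermLine (s : String) : Bool :=
  PySem.Str.startswith s "*Nset" || PySem.Str.startswith s "*End"

-- shared primitive: i.replace(' ', '').replace('\n', '').split(',')
def pvSplitLine (i : String) : List String :=
  (PySem.Str.split? (PySem.Str.replace (PySem.Str.replace i " " "") "\n" "") ",").getD []  -- split? is some: sep "," ≠ ""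

-- ===== PORT A =====
def extract_element_go : List String → Bool → PySem.Dict String (List String) → List (String × List String)
  | [], _, d => d.items            -- Python A falls off and returns None here: outside Pre_
  | i :: rest, eigen, d =>
    if PySem.Str.startswith i "*Element" then
      extract_element_go rest true d          -- eigenvalue = True, then inner 'pass'
    else if isTermLine i then d.items         -- elif: return element_dict
    else if eigen then
      match pvSplitLine i with                -- split(',') is never empty, so [] is unreachable
      | t0 :: ts => extract_element_go rest eigen (d.insert t0 ts)
      | [] => extract_element_go rest eigen d
    else extract_element_go rest eigen d

def extract_element (text : List String) : List (String × List String) :=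
  extract_element_go text false PySem.Dict.empty

-- ===== PORT B =====
-- phase 2 of Source B: collect data lines until a terminator
def extract_element_alt_collect : List String → PySem.Dict String (List String) → List (String × List String)
  | [], d => d.items               -- Python B returns None here: outside Pre_
  | i :: rest, d =>
    if isTermLine i then d.items
    else if PySem.Str.startswith i "*Element" then extract_element_alt_collect rest d
    else
      match pvSplitLine i with                -- split(',') is never empty, so [] is unreachable
      | t0 :: ts => extract_element_alt_collect rest (d.insert t0 ts)
      | [] => extract_element_alt_collect rest d

-- phase 1 of Source B: scan for the '*Element' header
def extract_element_alt : List String → List (String × List String)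
  | [] => []                       -- Python B returns None here: outside Pre_
  | i :: rest =>
    if isTermLine i then []
    else if PySem.Str.startswith i "*Element" then
      extract_element_alt_collect rest PySem.Dict.empty
    else extract_element_alt rest

-- ===== PRECONDITION & SPEC =====
-- Pre_ excludes inputs with no '*Nset'/'*End' line: there Python A falls off the loop and
-- returns None, which is not a dict value (B returns None there too).
def Pre_extract_element (text : List String) : Prop :=
  ∃ s ∈ text, isTermLine s = true
instance (text : List String) : Decidable (Pre_extract_element text) := by
  unfold Pre_extract_element; infer_instance

def pvWitness_extract_element : List String := ["*Element, type=T2D", "1, 2, 3", "*End Part"]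

def Spec_extract_element (text : List String) (out : List (String × List String)) : Prop := out = extract_element_alt text
instance (text : List String) (out : List (String × List String)) : Decidable (Spec_extract_element text out) := by unfold Spec_extract_element; infer_instance

-- ===== CLAIM (what is proved, stated in full; the proofs are below) =====
def Claim_equal_extract_element : Prop := ∀ (text : List String), Dom_extract_element text → Pre_extract_element text → Spec_extract_element text (extract_element text)

-- ===== LEMMAS AND PROOFS =====

-- a line starting with '*Element' is no terminator
lemma not_term_of_element (s : String) (h : PySem.Str.startswith s "*Element" = true) :
    isTermLine s = false := by
  simp only [isTermLine, PySem.Str.startswith_eq] at *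
  rw [PySem.Chars.startswith_iff] at h
  apply Bool.or_eq_false_iff.mpr
  constructor <;> [skip; skip] <;>
  · rw [Bool.eq_false_iff]
    intro hc
    rw [PySem.Chars.startswith_iff] at hc
    have := List.prefix_of_prefix_length_le hc h (by decide)
    revert this; decide

-- once the flag is set, A's loop is B's phase-2 collector
lemma go_true_eq_collect (lines : List String) (d : PySem.Dict String (List String)) :
    extract_element_go lines true d = extract_element_alt_collect lines d := by
  induction lines generalizing d with
  | nil => rfl
  | cons i rest ih =>
    by_cases he : PySem.Str.startswith i "*Element" = true
    · simp [extract_element_go, extract_element_alt_collect, he, not_term_of_element i he, ih]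
    · simp only [extract_element_go, extract_element_alt_collect, he, if_false]
      by_cases ht : isTermLine i = true
      · simp [ht]
      · simp only [ht, if_false, if_true]
        cases pvSplitLine i <;> simp [ih]

lemma go_false_eq_alt (lines : List String) :
    extract_element_go lines false PySem.Dict.empty = extract_element_alt lines := by
  induction lines with
  | nil => rfl
  | cons i rest ih =>
    by_cases he : PySem.Str.startswith i "*Element" = true
    · have he' := he
      rw [PySem.Str.startswith_eq, show "*Element".toList = ['*','E','l','e','m','e','n','t'] from rfl] at he'
      simp [extract_element_go, extract_element_alt, he', not_term_of_element i he,
        go_true_eq_collect]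
    · have he' : ¬ PySem.Chars.startswith i.toList ['*','E','l','e','m','e','n','t'] = true :=
        fun hc => he (by rw [PySem.Str.startswith_eq]; exact hc)
      by_cases ht : isTermLine i = true
      · simp [extract_element_go, extract_element_alt, he', ht, PySem.Dict.empty]
      · simp [extract_element_go, extract_element_alt, he', ht, ih]

-- ===== VERDICT (by name: the statement is the Claim_ definition above) =====
theorem extract_element_spec : Claim_equal_extract_element := by
  intro text _ _
  unfold Spec_extract_element extract_element
  exact go_false_eq_alt text
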